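-- pv_equiv track=rewrite | github.com/Ashiq5/dnssec-debugger-code | src/DFixer/util.py | get_parent_zone
-- ===== SOURCE A (Python) =====
-- def get_parent_zone(analysis, zone):
--     keys = list(analysis.keys())
--     keys = sorted(keys, key=lambda v: len(v), reverse=True)
--     for key in keys:
--         if key == zone or len(key) > len(zone):
--             continue
--         if "zone" not in analysis[key]:
--             continue
--         return key
-- ===== SOURCE B (Python) =====
-- def get_parent_zone(analysis, zone):
--     best = None
--     for key, val in analysis.items():
--         if key != zone and len(key) <= len(zone) and "zone" in val:
--             if best is None or len(best) < len(key):
--                 best = key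
--     return best
-- ===== Notes on version B (the rewrite author's own statement) =====
-- stated objective: alternative
-- what changed: Replaced sorting all keys by length and scanning for the first valid one with a single linear pass over the items that tracks the longest valid key (first on ties); O(n) instead of O(n log n), though not measurably faster at the tested sizes.
import Mathlib
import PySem

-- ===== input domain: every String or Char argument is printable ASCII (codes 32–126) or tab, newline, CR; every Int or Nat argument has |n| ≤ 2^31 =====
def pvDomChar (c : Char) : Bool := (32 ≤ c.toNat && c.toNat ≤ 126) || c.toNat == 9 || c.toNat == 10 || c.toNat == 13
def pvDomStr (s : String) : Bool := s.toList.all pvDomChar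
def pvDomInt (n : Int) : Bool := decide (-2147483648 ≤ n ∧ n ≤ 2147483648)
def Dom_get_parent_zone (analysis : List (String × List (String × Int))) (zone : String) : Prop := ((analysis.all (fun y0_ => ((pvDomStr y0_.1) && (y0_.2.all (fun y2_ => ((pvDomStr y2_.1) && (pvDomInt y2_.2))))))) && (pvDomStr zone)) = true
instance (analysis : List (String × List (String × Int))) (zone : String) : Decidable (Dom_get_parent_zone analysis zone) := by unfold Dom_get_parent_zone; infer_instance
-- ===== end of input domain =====

-- B replaces A's sort-all-keys-by-length-then-scan with a single linear pass tracking the longest valid key (first on ties); same return value, alternative algorithm.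


-- ===== PORT A =====
-- keys = sorted(analysis.keys(), key=len, reverse=True); return the first key k with
-- not (k == zone or len(k) > len(zone)) and "zone" in analysis[k]  (dict membership = some pair has that key)
def get_parent_zone (analysis : List (String × List (String × Int))) (zone : String) : Option String :=
  (PySem.List.sorted (PySem.Dict.ofList analysis).keys (fun v => PySem.Str.len v) true).find?
    (fun key =>
      !(key == zone || decide (PySem.Str.len key > PySem.Str.len zone)) &&
      ((PySem.Dict.ofList analysis).getD key []).any (fun p => p.1 == "zone"))

-- ===== PORT B =====
-- one pass over the items, keeping the longest valid key seen so far (strict > keeps the first on ties)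
def get_parent_zone_alt (analysis : List (String × List (String × Int))) (zone : String) : Option String :=
  (PySem.Dict.ofList analysis).items.foldl (fun best p =>
    if !(p.1 == zone) && decide (PySem.Str.len p.1 ≤ PySem.Str.len zone) &&
       p.2.any (fun q => q.1 == "zone") then
      match best with
      | none => some p.1
      | some b => if PySem.Str.len b < PySem.Str.len p.1 then some p.1 else best
    else best) none

-- ===== PRECONDITION & SPEC =====
def Spec_get_parent_zone (analysis : List (String × List (String × Int))) (zone : String) (out : Option String) : Prop := out = get_parent_zone_alt analysis zone
instance (analysis : List (String × List (String × Int))) (zone : String) (out : Option String) : Decidable (Spec_get_parent_zone analysis zone out) := by unfold Spec_get_parent_zone; infer_instance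

-- ===== CLAIM (what is proved, stated in full; the proofs are below) =====
def Claim_equal_get_parent_zone : Prop := ∀ (analysis : List (String × List (String × Int))) (zone : String), Dom_get_parent_zone analysis zone → Spec_get_parent_zone analysis zone (get_parent_zone analysis zone)

-- ===== LEMMAS AND PROOFS =====

-- B's loop step, abstracted over the validity predicate P
def pvStep (P : String → Bool) (acc : Option String) (k : String) : Option String :=
  if P k then
    match acc with
    | none => some k
    | some b => if PySem.Str.len b < PySem.Str.len k then some k else acc
  else acc

-- inserting x into a length-descending list commutes find? with one fold step
lemma find?_insertBy (P : String → Bool) (x : String) (s : List String)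
    (hs : s.Pairwise (fun a b => PySem.Str.len b ≤ PySem.Str.len a)) :
    List.find? P (PySem.List.insertBy (fun a b => decide (PySem.Str.len b < PySem.Str.len a)) x s)
      = pvStep P (List.find? P s) x := by
  induction s with
  | nil =>
    cases hPx : P x <;> simp [PySem.List.insertBy, pvStep, List.find?, hPx]
  | cons y ys ih =>
    obtain ⟨hy, hys⟩ := List.pairwise_cons.mp hs
    by_cases hlt : PySem.Str.len y < PySem.Str.len x
    · have hltn : y.length < x.length := by simpa using hlt
      have hins : PySem.List.insertBy (fun a b => decide (PySem.Str.len b < PySem.Str.len a)) x (y :: ys)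
          = x :: y :: ys := by simp [PySem.List.insertBy, hltn]
      rw [hins]
      cases hPx : P x
      · cases hf : List.find? P (y :: ys) <;>
          simp [hPx, pvStep, hf]
      · cases hf : List.find? P (y :: ys) with
        | none => simp [hPx, pvStep]
        | some r =>
          have hrmem := List.mem_of_find?_eq_some hf
          have hr : PySem.Str.len r ≤ PySem.Str.len y := by
            rcases List.mem_cons.mp hrmem with h | h
            · simp [h]
            · exact hy r h
          have hrx : r.length < x.length := by simpa using lt_of_le_of_lt hr hlt
          have hnr : ¬ x.length ≤ r.length := not_le.mpr hrx
          simp [hPx, pvStep, hnr]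
    · have hxy : ¬ y.length < x.length := by simpa using hlt
      have hins : PySem.List.insertBy (fun a b => decide (PySem.Str.len b < PySem.Str.len a)) x (y :: ys)
          = y :: PySem.List.insertBy (fun a b => decide (PySem.Str.len b < PySem.Str.len a)) x ys := by
        simp [PySem.List.insertBy, hxy]
      rw [hins]
      cases hPy : P y
      · simpa [List.find?_cons, hPy] using ih hys
      · cases hPx : P x <;> simp [hPy, pvStep, hPx, hxy]

-- find? over the stable reverse sort equals B's single-pass fold
lemma find?_sorted_eq_foldl (P : String → Bool) (ks : List String) :
    List.find? P (PySem.List.sorted ks (fun v => PySem.Str.len v) true)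
      = ks.foldl (pvStep P) none := by
  induction ks using List.reverseRecOn with
  | nil => simp [PySem.List.sorted]
  | append_singleton ks x ih =>
    have hsorted : PySem.List.sorted (ks ++ [x]) (fun v => PySem.Str.len v) true
        = PySem.List.insertBy (fun a b => decide (PySem.Str.len b < PySem.Str.len a)) x
            (PySem.List.sorted ks (fun v => PySem.Str.len v) true) := by
      rw [PySem.List.sorted_rev_eq_foldl_insertBy, List.foldl_append,
        ← PySem.List.sorted_rev_eq_foldl_insertBy]
      rfl
    rw [hsorted,
      find?_insertBy P x _ (PySem.List.sorted_pairwise_rev ks (fun v => PySem.Str.len v)),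
      ih, List.foldl_append]
    rfl

-- ===== VERDICT (by name: the statement is the Claim_ definition above) =====
theorem get_parent_zone_spec : Claim_equal_get_parent_zone := by
  intro analysis zone _
  unfold Spec_get_parent_zone get_parent_zone get_parent_zone_alt
  rw [PySem.Dict.items_eq_map_keys (PySem.Dict.ofList analysis)
      (PySem.Dict.nodup_keys_ofList analysis) [], List.foldl_map,
    find?_sorted_eq_foldl]
  apply PySem.List.foldl_congr_mem
  intro acc k _
  unfold pvStep
  dsimp only
  have hcond :
      (!(k == zone || decide (PySem.Str.len k > PySem.Str.len zone)) &&
        ((PySem.Dict.ofList analysis).getD k []).any (fun p => p.1 == "zone"))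
      = (!(k == zone) && decide (PySem.Str.len k ≤ PySem.Str.len zone) &&
        ((PySem.Dict.ofList analysis).getD k []).any (fun q => q.1 == "zone")) := by
    simp [Bool.not_or, ← decide_not, not_lt, Bool.and_assoc]
  simp only [hcond]
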